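-- pv_equiv track=rewrite | github.com/jaqlynai/encode-decode | encode_decode.py | alphanumeric_cipher
-- ===== SOURCE A (Python) =====
-- alphabet = ['a', 'b', 'c', 'd', 'e', 'f', 'g', 'h', 'i', 'j', 'k', 'l', 'm', 'n', 'o', 'p', 'q',
-- 'r', 's', 't', 'u', 'v', 'w', 'x', 'y', 'z']
--
-- numbers = ['1', '2', '3', '4', '5', '6', '7', '8', '9', '10', '11', '12', '13', '14', '15', '16',
-- '17', '18', '19', '20', '21', '22', '23', '24', '25', '26']
--
-- def alphanumeric_cipher(message):
--     '''
--     each letter in alphabet corresponds to a number such that a = 1, b = 2 ... z = 26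
--     '''
--
--     output = ''
--
--     try: #runs if decoding message
--         int(message[0])
--
--         original = numbers
--         compare = alphabet
--
--         message = message.split()
--
--     except ValueError: #runs if encoding message
--         original = alphabet
--         compare = numbers
--
--     for char in message:
--
--         indx = original.index(char)
--
--         new_char = compare[indx]
--
--         if new_char.isdigit():
--             output += new_char + ' '
--
--         else:
--             output += new_char
--
--     return output
-- ===== SOURCE B (Python) =====
-- def alphanumeric_cipher(message):
--     '''
--     each letter in alphabet corresponds to a number such that a = 1, b = 2 ... z = 26
--     '''
--     if message[0].isdigit():
--         return _decode(message.split())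
--     return message.translate(_ENCODE_TABLE)
--
-- def _decode(tokens):
--     if not tokens:
--         return ''
--     return chr(96 + int(tokens[0])) + _decode(tokens[1:])
--
-- _ENCODE_TABLE = str.maketrans({chr(96 + n): str(n) + ' ' for n in range(1, 27)})
-- ===== Notes on version B (the rewrite author's own statement) =====
-- stated objective: idiomatic
-- what changed: B drops A's parallel 26-entry lists and per-item list.index scans: encoding is a single str.translate call over a precomputed maketrans table (no explicit Python loop), decoding is a structural recursion over the token list using chr(96+int(token)) arithmetic; Pre_ excludes exactly the inputs on which A raises (empty message: IndexError; any character or whitespace token outside the tables: ValueError).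
import Mathlib
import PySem

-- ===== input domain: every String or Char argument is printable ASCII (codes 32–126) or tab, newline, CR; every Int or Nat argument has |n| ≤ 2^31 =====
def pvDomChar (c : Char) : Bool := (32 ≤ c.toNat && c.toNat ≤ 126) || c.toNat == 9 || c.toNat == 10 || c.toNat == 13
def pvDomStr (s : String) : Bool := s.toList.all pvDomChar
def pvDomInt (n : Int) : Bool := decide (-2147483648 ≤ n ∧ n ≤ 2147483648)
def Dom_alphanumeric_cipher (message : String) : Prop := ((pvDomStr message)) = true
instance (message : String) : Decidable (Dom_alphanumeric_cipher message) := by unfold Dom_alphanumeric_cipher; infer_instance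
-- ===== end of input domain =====

-- B replaces A's parallel-table loop by a single translate pass over a precomputed char→string
-- table for encoding and a structural recursion with chr arithmetic for decoding (objective:
-- idiomatic); equality of return values is claimed on Pre_ (the inputs where A raises nothing).

-- ===== PORT A =====
def pyAlphabet : List String :=
  ["a","b","c","d","e","f","g","h","i","j","k","l","m",
   "n","o","p","q","r","s","t","u","v","w","x","y","z"]

def pyNumbers : List String :=
  ["1","2","3","4","5","6","7","8","9","10","11","12","13",
   "14","15","16","17","18","19","20","21","22","23","24","25","26"]

-- one iteration of A's for-loop; the output string is carried as List Char, none = ValueError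
def pyAStep (original compare : List String) (acc : Option (List Char)) (ch : String) :
    Option (List Char) :=
  acc.bind fun out =>
    (PySem.List.index? original ch).bind fun indx =>
      -- compare[indx]: indx is the Nat returned by .index, always in range here
      (compare[indx]?).bind fun new_char =>
        some (if PySem.Str.strIsdigit new_char then out ++ new_char.toList ++ [' ']
              else out ++ new_char.toList)

def alphanumeric_cipher (message : String) : String :=
  match PySem.Str.pyGet? message 0 with
  | none => ""   -- message[0] raises IndexError; excluded by Pre_
  | some c =>
    -- try: int(message[0]) — ValueError exactly when ofStr? is none
    let dec := (PySem.Int.ofStr? (String.ofList [c])).isSome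
    let original := if dec then pyNumbers else pyAlphabet
    let comp := if dec then pyAlphabet else pyNumbers
    -- decoding iterates message.split(); encoding iterates the characters of message
    let items : List String :=
      if dec then PySem.Str.split₀ message
      else message.toList.map (fun ch => String.ofList [ch])
    String.ofList ((items.foldl (pyAStep original comp) (some [])).getD [])

-- ===== PORT B =====
-- _ENCODE_TABLE = str.maketrans({chr(96+n): str(n)+' ' for n in range(1,27)})
def pvEncodeTable : PySem.Dict Char String :=
  (PySem.List.pyRange 1 27 1).foldl
    (fun d n => d.insert (Char.ofNat (96 + n).toNat) (PySem.Int.toStr n ++ " "))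
    (PySem.Dict.mk [])

-- str.translate (ported by hand, exact for a char→string table over this domain):
-- a mapped character is replaced by its string, any other character is kept
def pvTranslate (table : PySem.Dict Char String) (s : List Char) : List Char :=
  s.flatMap (fun c => ((table.get? c).getD (String.ofList [c])).toList)

-- _decode: '' on no tokens, else chr(96 + int(tokens[0])) + _decode(tokens[1:]);
-- none = the ValueError int raises on a non-numeric token (excluded by Pre_)
def pvDecode : List String → Option (List Char)
  | [] => some []
  | t :: r => (PySem.Int.ofStr? t).bind fun n =>
      (pvDecode r).map fun rest => Char.ofNat (96 + n).toNat :: rest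

def alphanumeric_cipher_alt (message : String) : String :=
  match message.toList with
  | [] => ""   -- message[0] raises IndexError; excluded by Pre_
  | first :: _ =>
    if PySem.Chars.isdigit first then
      String.ofList ((pvDecode (PySem.Str.split₀ message)).getD [])
    else
      String.ofList (pvTranslate pvEncodeTable message.toList)

-- ===== PRECONDITION & SPEC =====
-- Pre_ excludes exactly the inputs where A raises: the empty message (IndexError) and any
-- character / whitespace-token outside the relevant table (ValueError from list.index).
def Pre_alphanumeric_cipher (message : String) : Prop :=
  message.toList ≠ [] ∧
  (if PySem.Chars.isdigit (message.toList.headD 'a')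
   then (PySem.Str.split₀ message).all (fun t => pyNumbers.contains t) = true
   else message.toList.all (fun ch => pyAlphabet.contains (String.ofList [ch])) = true)
instance (message : String) : Decidable (Pre_alphanumeric_cipher message) := by
  unfold Pre_alphanumeric_cipher; infer_instance

def pvWitness_alphanumeric_cipher : String := "hello"

def Spec_alphanumeric_cipher (message : String) (out : String) : Prop := out = alphanumeric_cipher_alt message
instance (message : String) (out : String) : Decidable (Spec_alphanumeric_cipher message out) := by unfold Spec_alphanumeric_cipher; infer_instance

-- ===== CLAIM (what is proved, stated in full; the proofs are below) =====
def Claim_equal_alphanumeric_cipher : Prop := ∀ (message : String), Dom_alphanumeric_cipher message → Pre_alphanumeric_cipher message → Spec_alphanumeric_cipher message (alphanumeric_cipher message)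

-- ===== LEMMAS AND PROOFS =====

theorem mem_digits_of_isdigit (c : Char) (h : PySem.Chars.isdigit c = true) :
    c ∈ ['0','1','2','3','4','5','6','7','8','9'] := by
  simp [PySem.Chars.isdigit, Char.le_def] at h
  have h0 : 48 ≤ c.toNat := h.1
  have h9 : c.toNat ≤ 57 := h.2
  have hc : c = Char.ofNat c.toNat := (Char.ofNat_toNat c).symm
  interval_cases h' : c.toNat <;> simp_all

theorem mem_lower_of_mem_alphabet (c : Char) (h : String.ofList [c] ∈ pyAlphabet) :
    c ∈ ['a','b','c','d','e','f','g','h','i','j','k','l','m',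
         'n','o','p','q','r','s','t','u','v','w','x','y','z'] := by
  have h' := List.mem_map_of_mem (f := String.toList) h
  simp [pyAlphabet] at h'
  rcases h' with h'|h'|h'|h'|h'|h'|h'|h'|h'|h'|h'|h'|h'|h'|h'|h'|h'|h'|h'|h'|h'|h'|h'|h'|h'|h' <;>
    subst h' <;> decide

theorem ofStr?_isSome_of_digit (c : Char) (h : PySem.Chars.isdigit c = true) :
    (PySem.Int.ofStr? (String.ofList [c])).isSome = true := by
  have hm := mem_digits_of_isdigit c h
  fin_cases hm <;> decide

theorem ofStr?_none_of_alpha (c : Char) (h : String.ofList [c] ∈ pyAlphabet) :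
    (PySem.Int.ofStr? (String.ofList [c])).isSome = false := by
  have hm := mem_lower_of_mem_alphabet c h
  fin_cases hm <;> decide

-- pyAStep's result is the accumulator followed by a suffix that does not depend on it
theorem pyAStep_shift (o p : List String) (out : List Char) (x : String) :
    pyAStep o p (some out) x = (pyAStep o p (some []) x).map (out ++ ·) := by
  unfold pyAStep
  cases PySem.List.index? o x with
  | none => rfl
  | some i =>
    cases hp : p[i]? with
    | none => simp [hp]
    | some nc => simp only [Option.bind, hp]; split_ifs <;> simp

-- per-token facts for decoding: int succeeds, and A's step appends the same single letter
theorem decode_tok (t : String) (ht : t ∈ pyNumbers) :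
    ∃ n c, PySem.Int.ofStr? t = some n ∧ Char.ofNat (96 + n).toNat = c ∧
      pyAStep pyNumbers pyAlphabet (some []) t = some [c] := by
  fin_cases ht <;> exact ⟨_, _, rfl, rfl, rfl⟩

theorem decode_both (l : List String) (h : ∀ t ∈ l, t ∈ pyNumbers) :
    ∃ L, pvDecode l = some L ∧
      ∀ out, l.foldl (pyAStep pyNumbers pyAlphabet) (some out) = some (out ++ L) := by
  induction l with
  | nil => exact ⟨[], rfl, fun out => by simp⟩
  | cons t r ih =>
    obtain ⟨n, c, hn, hc, hstep⟩ := decode_tok t (h t (List.mem_cons_self ..))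
    obtain ⟨L, h1, h2⟩ := ih (fun u hu => h u (List.mem_cons_of_mem _ hu))
    refine ⟨c :: L, ?_, fun out => ?_⟩
    · simp [pvDecode, hn, h1, hc]
    · rw [List.foldl_cons, pyAStep_shift, hstep, Option.map_some, h2]; simp

-- the maketrans fold evaluated to a literal dict
theorem pvEncodeTable_eq : pvEncodeTable = PySem.Dict.mk
    [('a', "1 "), ('b', "2 "), ('c', "3 "), ('d', "4 "), ('e', "5 "), ('f', "6 "), ('g', "7 "),
     ('h', "8 "), ('i', "9 "), ('j', "10 "), ('k', "11 "), ('l', "12 "), ('m', "13 "),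
     ('n', "14 "), ('o', "15 "), ('p', "16 "), ('q', "17 "), ('r', "18 "), ('s', "19 "),
     ('t', "20 "), ('u', "21 "), ('v', "22 "), ('w', "23 "), ('x', "24 "), ('y', "25 "),
     ('z', "26 ")] := by decide

-- per-char facts for encoding: the table maps c to exactly what A's step appends
theorem encode_char (c : Char) (h : String.ofList [c] ∈ pyAlphabet) :
    ∃ s : String, pvEncodeTable.get? c = some s ∧
      pyAStep pyAlphabet pyNumbers (some []) (String.ofList [c]) = some s.toList := by
  have hm := mem_lower_of_mem_alphabet c h
  rw [pvEncodeTable_eq]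
  fin_cases hm <;> exact ⟨_, rfl, rfl⟩

theorem encode_both (l : List Char) (h : ∀ ch ∈ l, String.ofList [ch] ∈ pyAlphabet)
    (out : List Char) :
    (l.map (fun ch => String.ofList [ch])).foldl (pyAStep pyAlphabet pyNumbers) (some out)
      = some (out ++ pvTranslate pvEncodeTable l) := by
  induction l generalizing out with
  | nil => simp [pvTranslate]
  | cons c r ih =>
    obtain ⟨s, hs, hstep⟩ := encode_char c (h c (List.mem_cons_self ..))
    rw [List.map_cons, List.foldl_cons, pyAStep_shift, hstep, Option.map_some,
        ih (fun u hu => h u (List.mem_cons_of_mem _ hu))]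
    simp [pvTranslate, hs]

-- ===== VERDICT (by name: the statement is the Claim_ definition above) =====
theorem alphanumeric_cipher_spec : Claim_equal_alphanumeric_cipher := by
  intro message _hdom hpre
  obtain ⟨hne, hcond⟩ := hpre
  obtain ⟨c, t, hl⟩ : ∃ c t, message.toList = c :: t := by
    cases h : message.toList with
    | nil => exact absurd h hne
    | cons a b => exact ⟨a, b, rfl⟩
  show alphanumeric_cipher message = alphanumeric_cipher_alt message
  have hget : PySem.Str.pyGet? message 0 = some c := by
    have h0 : PySem.Str.pyGet? message ((0 : Nat) : Int) = message.toList[(0 : Nat)]? :=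
      PySem.Str.pyGet?_natCast message 0
    rw [show (0 : Int) = ((0 : Nat) : Int) from rfl, h0, hl]; rfl
  unfold alphanumeric_cipher alphanumeric_cipher_alt
  rw [hget]
  rw [hl] at hcond ⊢
  simp only [List.headD_cons] at hcond
  by_cases hdig : PySem.Chars.isdigit c = true
  · rw [if_pos hdig] at hcond
    have hall : ∀ u ∈ PySem.Str.split₀ message, u ∈ pyNumbers := by simpa using hcond
    obtain ⟨L, h1, h2⟩ := decode_both _ hall
    simp only [hdig, if_true]
    simp only [ofStr?_isSome_of_digit c hdig, if_true]
    rw [h2, h1]; simp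
  · rw [if_neg hdig] at hcond
    have hdig' : PySem.Chars.isdigit c = false := by
      cases h : PySem.Chars.isdigit c
      · rfl
      · exact absurd h hdig
    have hall : ∀ ch ∈ c :: t, String.ofList [ch] ∈ pyAlphabet := by simpa using hcond
    simp only [hdig', if_false, Bool.false_eq_true] at *
    have hnone := ofStr?_none_of_alpha c (hall c (List.mem_cons_self ..))
    simp only [hnone, if_false, Bool.false_eq_true]
    rw [encode_both (c :: t) hall]; simp
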